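-- pv_equiv track=rewrite | github.com/JJMills/Project-Euler | Python/src/Problem022.py | character_to_number
-- ===== SOURCE A (Python) =====
-- import string
--
-- def character_to_number(character):
--     if character == "\"":
--         return 0
--     else:
--         character = character.lower()
--         for i in range(0, 26):
--             if character == string.ascii_letters[i]:
--                 return i + 1
-- ===== SOURCE B (Python) =====
-- def character_to_number(character):
--     if character == '"':
--         return 0
--     c = character.lower()
--     if len(c) == 1 and 'a' <= c <= 'z':
--         return ord(c) - ord('a') + 1
--     return None
-- ===== Notes on version B (the rewrite author's own statement) =====
-- stated objective: simpler
-- what changed: Replaced the 26-iteration scan over string.ascii_letters with a single closed-form ordinal subtraction guarded by a lowercase-letter range check.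
import Mathlib
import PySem

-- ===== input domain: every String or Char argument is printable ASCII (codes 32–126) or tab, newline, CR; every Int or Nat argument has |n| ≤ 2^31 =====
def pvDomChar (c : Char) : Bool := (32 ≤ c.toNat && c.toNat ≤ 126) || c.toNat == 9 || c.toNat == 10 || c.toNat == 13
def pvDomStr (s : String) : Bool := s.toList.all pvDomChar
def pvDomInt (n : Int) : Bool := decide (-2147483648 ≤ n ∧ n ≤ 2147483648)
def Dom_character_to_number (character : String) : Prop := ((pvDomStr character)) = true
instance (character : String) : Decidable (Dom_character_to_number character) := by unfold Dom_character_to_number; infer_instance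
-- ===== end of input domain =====

-- B replaces A's 26-step scan over string.ascii_letters with one closed-form
-- arithmetic expression guarded by a range check (objective: simpler).

-- ===== PORT A =====
-- string.ascii_letters
def asciiLetters : String := "abcdefghijklmnopqrstuvwxyzABCDEFGHIJKLMNOPQRSTUVWXYZ"

-- the 'for i in range(0, 26)' loop: compare against the 1-char string ascii_letters[i]
def ctnLoop (c : String) : List Int → Option Int
  | [] => none
  | i :: rest =>
    match PySem.Str.pyGet? asciiLetters i with
    | some ch => if c = String.ofList [ch] then some (i + 1) else ctnLoop c rest
    | none => none   -- unreachable: every i of range(0, 26) is in range for ascii_letters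

def character_to_number (character : String) : Option Int :=
  if character = "\"" then some 0
  else ctnLoop (PySem.Str.lower character) (PySem.List.pyRange 0 26 1)

-- ===== PORT B =====
def character_to_number_alt (character : String) : Option Int :=
  if character = "\"" then some 0
  else
    match (PySem.Str.lower character).toList with
    | [ch] => if 'a' ≤ ch ∧ ch ≤ 'z' then some ((ch.toNat : Int) - 97 + 1) else none
    | _ => none

-- ===== PRECONDITION & SPEC =====
def Spec_character_to_number (character : String) (out : Option Int) : Prop := out = character_to_number_alt character
instance (character : String) (out : Option Int) : Decidable (Spec_character_to_number character out) := by unfold Spec_character_to_number; infer_instance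

-- ===== CLAIM (what is proved, stated in full; the proofs are below) =====
def Claim_equal_character_to_number : Prop := ∀ (character : String), Dom_character_to_number character → Spec_character_to_number character (character_to_number character)

-- ===== LEMMAS AND PROOFS =====

theorem char_eq_iff (c d : Char) : (c = d) ↔ c.toNat = d.toNat := by
  constructor
  · intro h; rw [h]
  · intro h; exact Char.ext (UInt32.toNat_inj.mp h)

theorem char_le_iff (c d : Char) : (c ≤ d) ↔ c.toNat ≤ d.toNat := ⟨fun h => h, fun h => h⟩

-- the 26 equality tests of A's scan collapse to one interval test
set_option maxHeartbeats 1000000 in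
theorem char_chain (ch : Char) :
    (if ch = 'a' then some (1:Int) else if ch = 'b' then some (2:Int) else if ch = 'c' then some (3:Int) else if ch = 'd' then some (4:Int) else if ch = 'e' then some (5:Int) else if ch = 'f' then some (6:Int) else if ch = 'g' then some (7:Int) else if ch = 'h' then some (8:Int) else if ch = 'i' then some (9:Int) else if ch = 'j' then some (10:Int) else if ch = 'k' then some (11:Int) else if ch = 'l' then some (12:Int) else if ch = 'm' then some (13:Int) else if ch = 'n' then some (14:Int) else if ch = 'o' then some (15:Int) else if ch = 'p' then some (16:Int) else if ch = 'q' then some (17:Int) else if ch = 'r' then some (18:Int) else if ch = 's' then some (19:Int) else if ch = 't' then some (20:Int) else if ch = 'u' then some (21:Int) else if ch = 'v' then some (22:Int) else if ch = 'w' then some (23:Int) else if ch = 'x' then some (24:Int) else if ch = 'y' then some (25:Int) else if ch = 'z' then some (26:Int) else none)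
    = (if 'a' ≤ ch ∧ ch ≤ 'z' then some ((ch.toNat : Int) - 97 + 1) else none) := by
  by_cases h0 : ch = 'a'
  · subst h0; decide
  rw [if_neg h0]
  by_cases h1 : ch = 'b'
  · subst h1; decide
  rw [if_neg h1]
  by_cases h2 : ch = 'c'
  · subst h2; decide
  rw [if_neg h2]
  by_cases h3 : ch = 'd'
  · subst h3; decide
  rw [if_neg h3]
  by_cases h4 : ch = 'e'
  · subst h4; decide
  rw [if_neg h4]
  by_cases h5 : ch = 'f'
  · subst h5; decide
  rw [if_neg h5]
  by_cases h6 : ch = 'g'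
  · subst h6; decide
  rw [if_neg h6]
  by_cases h7 : ch = 'h'
  · subst h7; decide
  rw [if_neg h7]
  by_cases h8 : ch = 'i'
  · subst h8; decide
  rw [if_neg h8]
  by_cases h9 : ch = 'j'
  · subst h9; decide
  rw [if_neg h9]
  by_cases h10 : ch = 'k'
  · subst h10; decide
  rw [if_neg h10]
  by_cases h11 : ch = 'l'
  · subst h11; decide
  rw [if_neg h11]
  by_cases h12 : ch = 'm'
  · subst h12; decide
  rw [if_neg h12]
  by_cases h13 : ch = 'n'
  · subst h13; decide
  rw [if_neg h13]
  by_cases h14 : ch = 'o'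
  · subst h14; decide
  rw [if_neg h14]
  by_cases h15 : ch = 'p'
  · subst h15; decide
  rw [if_neg h15]
  by_cases h16 : ch = 'q'
  · subst h16; decide
  rw [if_neg h16]
  by_cases h17 : ch = 'r'
  · subst h17; decide
  rw [if_neg h17]
  by_cases h18 : ch = 's'
  · subst h18; decide
  rw [if_neg h18]
  by_cases h19 : ch = 't'
  · subst h19; decide
  rw [if_neg h19]
  by_cases h20 : ch = 'u'
  · subst h20; decide
  rw [if_neg h20]
  by_cases h21 : ch = 'v'
  · subst h21; decide
  rw [if_neg h21]
  by_cases h22 : ch = 'w'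
  · subst h22; decide
  rw [if_neg h22]
  by_cases h23 : ch = 'x'
  · subst h23; decide
  rw [if_neg h23]
  by_cases h24 : ch = 'y'
  · subst h24; decide
  rw [if_neg h24]
  by_cases h25 : ch = 'z'
  · subst h25; decide
  rw [if_neg h25]
  have hne : ¬ ('a' ≤ ch ∧ ch ≤ 'z') := by
    rintro ⟨ha, hz⟩
    have ha' : 97 ≤ ch.toNat := (char_le_iff 'a' ch).mp ha
    have hz' : ch.toNat ≤ 122 := (char_le_iff ch 'z').mp hz
    have k0 : ch.toNat ≠ 97 := fun h => h0 ((char_eq_iff ch 'a').mpr h)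
    have k1 : ch.toNat ≠ 98 := fun h => h1 ((char_eq_iff ch 'b').mpr h)
    have k2 : ch.toNat ≠ 99 := fun h => h2 ((char_eq_iff ch 'c').mpr h)
    have k3 : ch.toNat ≠ 100 := fun h => h3 ((char_eq_iff ch 'd').mpr h)
    have k4 : ch.toNat ≠ 101 := fun h => h4 ((char_eq_iff ch 'e').mpr h)
    have k5 : ch.toNat ≠ 102 := fun h => h5 ((char_eq_iff ch 'f').mpr h)
    have k6 : ch.toNat ≠ 103 := fun h => h6 ((char_eq_iff ch 'g').mpr h)
    have k7 : ch.toNat ≠ 104 := fun h => h7 ((char_eq_iff ch 'h').mpr h)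
    have k8 : ch.toNat ≠ 105 := fun h => h8 ((char_eq_iff ch 'i').mpr h)
    have k9 : ch.toNat ≠ 106 := fun h => h9 ((char_eq_iff ch 'j').mpr h)
    have k10 : ch.toNat ≠ 107 := fun h => h10 ((char_eq_iff ch 'k').mpr h)
    have k11 : ch.toNat ≠ 108 := fun h => h11 ((char_eq_iff ch 'l').mpr h)
    have k12 : ch.toNat ≠ 109 := fun h => h12 ((char_eq_iff ch 'm').mpr h)
    have k13 : ch.toNat ≠ 110 := fun h => h13 ((char_eq_iff ch 'n').mpr h)
    have k14 : ch.toNat ≠ 111 := fun h => h14 ((char_eq_iff ch 'o').mpr h)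
    have k15 : ch.toNat ≠ 112 := fun h => h15 ((char_eq_iff ch 'p').mpr h)
    have k16 : ch.toNat ≠ 113 := fun h => h16 ((char_eq_iff ch 'q').mpr h)
    have k17 : ch.toNat ≠ 114 := fun h => h17 ((char_eq_iff ch 'r').mpr h)
    have k18 : ch.toNat ≠ 115 := fun h => h18 ((char_eq_iff ch 's').mpr h)
    have k19 : ch.toNat ≠ 116 := fun h => h19 ((char_eq_iff ch 't').mpr h)
    have k20 : ch.toNat ≠ 117 := fun h => h20 ((char_eq_iff ch 'u').mpr h)
    have k21 : ch.toNat ≠ 118 := fun h => h21 ((char_eq_iff ch 'v').mpr h)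
    have k22 : ch.toNat ≠ 119 := fun h => h22 ((char_eq_iff ch 'w').mpr h)
    have k23 : ch.toNat ≠ 120 := fun h => h23 ((char_eq_iff ch 'x').mpr h)
    have k24 : ch.toNat ≠ 121 := fun h => h24 ((char_eq_iff ch 'y').mpr h)
    have k25 : ch.toNat ≠ 122 := fun h => h25 ((char_eq_iff ch 'z').mpr h)
    omega
  rw [if_neg hne]

-- A's 26-step scan computed in closed form
set_option maxHeartbeats 1000000 in
theorem ctnLoop_eq (s : String) :
    ctnLoop s (PySem.List.pyRange 0 26 1) =
      (match s.toList with
       | [ch] => if 'a' ≤ ch ∧ ch ≤ 'z' then some ((ch.toNat : Int) - 97 + 1) else none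
       | _ => none) := by
  have hr : PySem.List.pyRange 0 26 1 = ([0,1,2,3,4,5,6,7,8,9,10,11,12,13,14,15,16,17,18,19,20,21,22,23,24,25] : List Int) := by decide
  have e : ∀ (s : String) (c : Char), (s = String.ofList [c]) = (s.toList = [c]) := by
    intro s c; rw [eq_iff_iff, ← String.toList_inj]; simp
  have g0 : PySem.Str.pyGet? asciiLetters (0:Int) = some 'a' := by decide
  have g1 : PySem.Str.pyGet? asciiLetters (1:Int) = some 'b' := by decide
  have g2 : PySem.Str.pyGet? asciiLetters (2:Int) = some 'c' := by decide
  have g3 : PySem.Str.pyGet? asciiLetters (3:Int) = some 'd' := by decide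
  have g4 : PySem.Str.pyGet? asciiLetters (4:Int) = some 'e' := by decide
  have g5 : PySem.Str.pyGet? asciiLetters (5:Int) = some 'f' := by decide
  have g6 : PySem.Str.pyGet? asciiLetters (6:Int) = some 'g' := by decide
  have g7 : PySem.Str.pyGet? asciiLetters (7:Int) = some 'h' := by decide
  have g8 : PySem.Str.pyGet? asciiLetters (8:Int) = some 'i' := by decide
  have g9 : PySem.Str.pyGet? asciiLetters (9:Int) = some 'j' := by decide
  have g10 : PySem.Str.pyGet? asciiLetters (10:Int) = some 'k' := by decide
  have g11 : PySem.Str.pyGet? asciiLetters (11:Int) = some 'l' := by decide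
  have g12 : PySem.Str.pyGet? asciiLetters (12:Int) = some 'm' := by decide
  have g13 : PySem.Str.pyGet? asciiLetters (13:Int) = some 'n' := by decide
  have g14 : PySem.Str.pyGet? asciiLetters (14:Int) = some 'o' := by decide
  have g15 : PySem.Str.pyGet? asciiLetters (15:Int) = some 'p' := by decide
  have g16 : PySem.Str.pyGet? asciiLetters (16:Int) = some 'q' := by decide
  have g17 : PySem.Str.pyGet? asciiLetters (17:Int) = some 'r' := by decide
  have g18 : PySem.Str.pyGet? asciiLetters (18:Int) = some 's' := by decide
  have g19 : PySem.Str.pyGet? asciiLetters (19:Int) = some 't' := by decide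
  have g20 : PySem.Str.pyGet? asciiLetters (20:Int) = some 'u' := by decide
  have g21 : PySem.Str.pyGet? asciiLetters (21:Int) = some 'v' := by decide
  have g22 : PySem.Str.pyGet? asciiLetters (22:Int) = some 'w' := by decide
  have g23 : PySem.Str.pyGet? asciiLetters (23:Int) = some 'x' := by decide
  have g24 : PySem.Str.pyGet? asciiLetters (24:Int) = some 'y' := by decide
  have g25 : PySem.Str.pyGet? asciiLetters (25:Int) = some 'z' := by decide
  rw [hr]
  simp only [ctnLoop, g0, g1, g2, g3, g4, g5, g6, g7, g8, g9, g10, g11, g12, g13, g14, g15, g16, g17, g18, g19, g20, g21, g22, g23, g24, g25, e]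
  norm_num
  cases hl : s.toList with
  | nil => simp
  | cons ch t =>
    cases t with
    | nil => simpa using char_chain ch
    | cons d t2 => simp

-- ===== VERDICT (by name: the statement is the Claim_ definition above) =====
theorem character_to_number_spec : Claim_equal_character_to_number := by
  intro character _
  unfold Spec_character_to_number character_to_number character_to_number_alt
  by_cases h : character = "\""
  · simp [h]
  · simp only [h, ite_false]
    exact ctnLoop_eq (PySem.Str.lower character)
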